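-- pv_equiv track=rewrite | github.com/ZouJoshua/dl_project | nlp_tasks/sequence_labeling/zh_ner/preprocess_data.py | bio_to_bioes
-- ===== SOURCE A (Python) =====
-- def bio_to_bioes(tags):
--     """
--     把bio编码标注格式转换为bioes编码
--     :param tags: 新的tags
--     :return:
--     """
--     new_tags = []
--     for i, tag in enumerate(tags):
--         if tag == "O":
--             new_tags.append(tag)
--         elif tag.split("-")[0] == "B":
--             # 如果tag是以B开头
--             # 首先，如果当前tag不是最后一个，并且紧跟着的后一个是I
--             if (i+1) < len(tags) and tags[i+1].split("-")[0] == "I":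
--                 new_tags.append(tag)
--             else:
--                 # 如果最优一个或者紧跟着的后一个不是Ｉ，那么表示单字，需要把Ｂ换成Ｓ表示单字
--                 new_tags.append(tag.replace("B-", "S-"))
--         elif tag.split("-")[0] == "I":
--             # 如果tag是以Ｉ开头，那么需要进行判断
--             # 首先，如果当前tag不是最后一个，并且紧跟着的一个是Ｉ
--             if (i+1) < len(tags) and tags[i+1].split("-")[0] == "I":
--                 new_tags.append(tag)
--             else:
--                 # 如果是最后一个，或者后一个不是I开头的，那么就表示一个词的结尾，就把I换成E表示一个词结尾
--                 new_tags.append(tag.replace("I-", "E-"))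
--         else:
--             raise Exception("非法编码标注格式")
--     return new_tags
-- ===== SOURCE B (Python) =====
-- def bio_to_bioes(tags):
--     """
--     把bio编码标注格式转换为bioes编码 — single reverse pass carrying a
--     'next tag starts with I' flag instead of indexing tags[i+1].
--     """
--     out = []
--     next_is_I = False
--     for tag in reversed(tags):
--         if tag == "O":
--             out.append("O")
--             next_is_I = False
--         else:
--             prefix = tag.split("-")[0]
--             if prefix == "B":
--                 out.append(tag if next_is_I else tag.replace("B-", "S-"))
--                 next_is_I = False
--             elif prefix == "I":
--                 out.append(tag if next_is_I else tag.replace("I-", "E-"))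
--                 next_is_I = True
--             else:
--                 raise Exception("非法编码标注格式")
--     out.reverse()
--     return out
-- ===== Notes on version B (the rewrite author's own statement) =====
-- stated objective: alternative
-- what changed: Replaces A's forward loop that indexes tags[i+1] for lookahead by a single reverse scan carrying a boolean 'next tag starts with I' flag, collected and reversed at the end.
import Mathlib
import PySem

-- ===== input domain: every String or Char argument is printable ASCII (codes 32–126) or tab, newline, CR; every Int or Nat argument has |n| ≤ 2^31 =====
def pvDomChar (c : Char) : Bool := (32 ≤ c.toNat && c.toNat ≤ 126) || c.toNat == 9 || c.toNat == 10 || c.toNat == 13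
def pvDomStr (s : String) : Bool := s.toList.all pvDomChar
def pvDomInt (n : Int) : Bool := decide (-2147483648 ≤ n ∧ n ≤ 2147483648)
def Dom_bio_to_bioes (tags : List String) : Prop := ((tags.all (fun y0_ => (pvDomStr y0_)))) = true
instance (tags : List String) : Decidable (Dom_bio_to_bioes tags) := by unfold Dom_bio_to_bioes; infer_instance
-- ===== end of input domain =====

-- B replaces A's index-lookahead loop by a single reverse pass carrying a 'next tag starts with I' flag (objective: alternative decomposition).

-- tag.split("-")[0]  (split with a nonempty separator never returns an empty list, so [0] is headD)
def pvPrefix (tag : String) : String := (((PySem.Str.split? tag "-").getD []).headD "")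

-- ===== PORT A =====
def pvStepA (tags : List String) (i : Int) (tag : String) : String :=
  if tag = "O" then tag
  else if pvPrefix tag = "B" then
    (if i + 1 < (tags.length : Int) ∧ pvPrefix ((PySem.List.pyGet? tags (i + 1)).getD "") = "I"
     then tag else PySem.Str.replace tag "B-" "S-")
  else if pvPrefix tag = "I" then
    (if i + 1 < (tags.length : Int) ∧ pvPrefix ((PySem.List.pyGet? tags (i + 1)).getD "") = "I"
     then tag else PySem.Str.replace tag "I-" "E-")
  else tag  -- Python raises Exception here; such inputs are excluded by Pre_

def bio_to_bioes (tags : List String) : List String :=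
  (PySem.List.enumerate tags).foldl (fun acc p => acc ++ [pvStepA tags p.1 p.2]) []

-- ===== PORT B =====
def pvStepB (st : List String × Bool) (tag : String) : List String × Bool :=
  if tag = "O" then (st.1 ++ ["O"], false)
  else if pvPrefix tag = "B" then
    (st.1 ++ [if st.2 then tag else PySem.Str.replace tag "B-" "S-"], false)
  else if pvPrefix tag = "I" then
    (st.1 ++ [if st.2 then tag else PySem.Str.replace tag "I-" "E-"], true)
  else (st.1 ++ [tag], false)  -- Python raises Exception here; such inputs are excluded by Pre_

def bio_to_bioes_alt (tags : List String) : List String :=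
  (tags.reverse.foldl pvStepB ([], false)).1.reverse

-- ===== PRECONDITION & SPEC =====
-- Pre_ excludes exactly the inputs on which Python A (and Python B) raises: a tag that is not "O" and whose split("-")[0] is neither "B" nor "I".
def Pre_bio_to_bioes (tags : List String) : Prop :=
  ∀ tag ∈ tags, tag = "O" ∨ pvPrefix tag = "B" ∨ pvPrefix tag = "I"
instance (tags : List String) : Decidable (Pre_bio_to_bioes tags) := by unfold Pre_bio_to_bioes; infer_instance
def pvWitness_bio_to_bioes : List String := ["B-PER", "I-PER", "I-PER", "O", "B-LOC"]

def Spec_bio_to_bioes (tags : List String) (out : List String) : Prop := out = bio_to_bioes_alt tags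
instance (tags : List String) (out : List String) : Decidable (Spec_bio_to_bioes tags out) := by unfold Spec_bio_to_bioes; infer_instance

-- ===== CLAIM (what is proved, stated in full; the proofs are below) =====
def Claim_equal_bio_to_bioes : Prop := ∀ (tags : List String), Dom_bio_to_bioes tags → Pre_bio_to_bioes tags → Spec_bio_to_bioes tags (bio_to_bioes tags)

-- ===== LEMMAS AND PROOFS =====

-- does this tag's split("-")[0] equal "I"?
def pvFlag (tag : String) : Bool := pvPrefix tag == "I"

-- the flag B's scan carries when it is about to process the tag just left of l, if the flag below l is b
def pvNextB : List String → Bool → Bool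
  | [], b => b
  | t :: _, _ => pvFlag t

-- the common per-tag value, given the lookahead flag
def pvG (tag : String) (b : Bool) : String :=
  if tag = "O" then "O"
  else if pvPrefix tag = "B" then (if b then tag else PySem.Str.replace tag "B-" "S-")
  else if pvPrefix tag = "I" then (if b then tag else PySem.Str.replace tag "I-" "E-")
  else tag

-- reference result: process l with bottom flag b
def pvF : List String → Bool → List String
  | [], _ => []
  | t :: rest, b => pvG t (pvNextB rest b) :: pvF rest b

theorem pvStepB_eq (st : List String × Bool) (tag : String) :
    pvStepB st tag = (st.1 ++ [pvG tag st.2], pvFlag tag) := by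
  unfold pvStepB pvG pvFlag
  split_ifs with h1 h2 h3 <;> simp_all [pvPrefix]
  · subst h1; decide

theorem foldB_eq (l : List String) (acc : List String) (b : Bool) :
    l.reverse.foldl pvStepB (acc, b) = (acc ++ (pvF l b).reverse, pvNextB l b) := by
  induction l generalizing acc b with
  | nil => simp [pvF, pvNextB]
  | cons t rest ih =>
      simp only [List.reverse_cons, List.foldl_append, ih, List.foldl_cons, List.foldl_nil,
        pvStepB_eq, pvF, pvNextB, List.reverse_cons]
      simp

theorem alt_eq (tags : List String) : bio_to_bioes_alt tags = pvF tags false := by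
  unfold bio_to_bioes_alt
  rw [foldB_eq]
  simp

theorem length_pvF (l : List String) (b : Bool) : (pvF l b).length = l.length := by
  induction l with
  | nil => rfl
  | cons t rest ih => simp [pvF, ih]

theorem getElem_pvF (l : List String) (i : Nat) (h : i < l.length) (h' : i < (pvF l false).length) :
    (pvF l false)[i] =
      pvG l[i] (if h2 : i + 1 < l.length then pvFlag l[i + 1] else false) := by
  induction l generalizing i with
  | nil => simp at h
  | cons t rest ih =>
      cases i with
      | zero =>
          cases rest with
          | nil => simp [pvF, pvNextB]
          | cons u rest' => simp [pvF, pvNextB]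
      | succ j =>
          simp only [pvF, List.getElem_cons_succ]
          have hj : j < rest.length := by simpa using h
          rw [ih j hj (by simpa [length_pvF] using hj)]
          by_cases hc : j + 1 < rest.length
          · have hc2 : j + 1 + 1 < (t :: rest).length := by simp; omega
            rw [dif_pos hc, dif_pos hc2]
          · have hc2 : ¬ (j + 1 + 1 < (t :: rest).length) := by simp; omega
            rw [dif_neg hc, dif_neg hc2]

theorem pvStepA_eq (tags : List String) (i : Nat) (h : i < tags.length) :
    pvStepA tags (i : Int) tags[i] =
      pvG tags[i] (if h2 : i + 1 < tags.length then pvFlag tags[i + 1] else false) := by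
  unfold pvStepA pvG pvFlag
  by_cases h2 : i + 1 < tags.length
  · have hget : PySem.List.pyGet? tags ((i : Int) + 1) = some tags[i + 1] := by
      have : ((i : Int) + 1) = ((i + 1 : Nat) : Int) := by push_cast; ring
      rw [this, PySem.List.pyGet?_natCast]
      simp [h2]
    have hlt : (i : Int) + 1 < (tags.length : Int) := by exact_mod_cast h2
    simp only [hget, Option.getD_some, dif_pos h2]
    by_cases hI : pvPrefix tags[i + 1] = "I" <;>
      split_ifs with a1 a2 a3 a4 a5 <;> simp_all
  · have hlt : ¬ ((i : Int) + 1 < (tags.length : Int)) := by exact_mod_cast h2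
    simp only [dif_neg h2]
    split_ifs with a1 a2 a3 a4 a5 <;> simp_all

theorem a_eq (tags : List String) : bio_to_bioes tags = pvF tags false := by
  unfold bio_to_bioes
  rw [PySem.List.foldl_append_singleton_eq_map]
  apply List.ext_getElem
  · simp [PySem.List.length_enumerate, length_pvF]
  · intro i h1 h2
    have hi : i < tags.length := by simpa [PySem.List.length_enumerate] using h1
    simp only [List.nil_append] at h1 ⊢
    rw [List.getElem_map, PySem.List.getElem_enumerate]
    simp only [Int.zero_add]
    rw [pvStepA_eq tags i hi, getElem_pvF tags i hi (by simpa [length_pvF] using hi)]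

-- ===== VERDICT (by name: the statement is the Claim_ definition above) =====
theorem bio_to_bioes_spec : Claim_equal_bio_to_bioes := by
  intro tags _ _
  unfold Spec_bio_to_bioes
  rw [a_eq, alt_eq]
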